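-- pv_equiv track=rewrite | github.com/DanDits/Masterarbeit | polynomial_chaos/multivariation.py | sparse_center_iterator
-- ===== SOURCE A (Python) =====
-- import math
--
-- def sparse_center_iterator(data, level):
--     total = len(data)
--     direction = 1
--     i = (total - 1) // 2
--     while 0 <= i < total:
--         yield data[i]
--         i += direction
--         direction = int(-math.copysign(abs(direction) + 1, direction))
-- ===== SOURCE B (Python) =====
-- def sparse_center_iterator(data, level):
--     total = len(data)
--     if total == 0:
--         return
--     c = (total - 1) // 2
--     yield data[c]
--     d = 1
--     while c + d < total or c - d >= 0:
--         if c + d < total: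
--             yield data[c + d]
--         if c - d >= 0:
--             yield data[c - d]
--         d += 1
-- ===== Notes on version B (the rewrite author's own statement) =====
-- stated objective: simpler
-- what changed: A walks a single index driven by a signed accumulator whose stride grows via math.copysign; B computes the center index once and runs a plain distance counter d=1,2,... emitting data[c+d] then data[c-d] per step, with no signed-stride state.
import Mathlib
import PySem

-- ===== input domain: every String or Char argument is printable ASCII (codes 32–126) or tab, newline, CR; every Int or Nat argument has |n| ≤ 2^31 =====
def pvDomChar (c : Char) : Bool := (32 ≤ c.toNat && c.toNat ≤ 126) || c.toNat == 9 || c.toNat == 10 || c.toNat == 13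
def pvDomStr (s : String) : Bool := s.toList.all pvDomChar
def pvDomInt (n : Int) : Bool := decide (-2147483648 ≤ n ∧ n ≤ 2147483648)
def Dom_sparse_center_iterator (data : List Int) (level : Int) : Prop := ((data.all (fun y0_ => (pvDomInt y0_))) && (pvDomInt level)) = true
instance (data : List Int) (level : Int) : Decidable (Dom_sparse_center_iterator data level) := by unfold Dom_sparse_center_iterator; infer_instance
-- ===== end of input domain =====

-- B replaces A's signed growing-stride accumulator (copysign) by a center index plus an explicit
-- distance counter emitting a right/left pair per step (objective: simpler decomposition; same order, same cost).


-- ===== PORT A =====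
-- A's while loop: state (i, direction); direction update is int(-math.copysign(abs(direction)+1, direction)),
-- exact on nonzero ints: d ≥ 0 → -(d+1), d < 0 → -(d-1).  Fuel only guards totality (2*len+3 always suffices).
def goA (data : List Int) (total : Int) (i direction : Int) : Nat → List Int
  | 0 => []
  | fuel+1 =>
    if 0 ≤ i ∧ i < total then
      ((PySem.List.pyGet? data i).getD 0) ::
        goA data total (i + direction)
          (if 0 ≤ direction then -(direction + 1) else -(direction - 1)) fuel
    else []

def sparse_center_iterator (data : List Int) (level : Int) : List Int :=
  let total : Int := data.length
  goA data total (PySem.Int.floordiv (total - 1) 2) 1 (2 * data.length + 3)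

-- ===== PORT B =====
-- B's while loop: distance counter d, one right/left pair per iteration.  Fuel only guards totality.
def goB (data : List Int) (total c : Int) (d : Int) : Nat → List Int
  | 0 => []
  | fuel+1 =>
    if c + d < total ∨ 0 ≤ c - d then
      ((if c + d < total then [(PySem.List.pyGet? data (c + d)).getD 0] else []) ++
       (if 0 ≤ c - d then [(PySem.List.pyGet? data (c - d)).getD 0] else [])) ++
      goB data total c (d + 1) fuel
    else []

def sparse_center_iterator_alt (data : List Int) (level : Int) : List Int :=
  let total : Int := data.length
  if total = 0 then []
  else
    let c := PySem.Int.floordiv (total - 1) 2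
    ((PySem.List.pyGet? data c).getD 0) :: goB data total c 1 (data.length + 1)

-- ===== PRECONDITION & SPEC =====
def Spec_sparse_center_iterator (data : List Int) (level : Int) (out : List Int) : Prop := out = sparse_center_iterator_alt data level
instance (data : List Int) (level : Int) (out : List Int) : Decidable (Spec_sparse_center_iterator data level out) := by unfold Spec_sparse_center_iterator; infer_instance

-- ===== CLAIM (what is proved, stated in full; the proofs are below) =====
def Claim_equal_sparse_center_iterator : Prop := ∀ (data : List Int) (level : Int), Dom_sparse_center_iterator data level → Spec_sparse_center_iterator data level (sparse_center_iterator data level)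

-- ===== LEMMAS AND PROOFS =====

-- one-step unfolding equations (simp only [goA] would unfold through literal fuel)
lemma goA_succ (data : List Int) (total i direction : Int) (fuel : Nat) :
    goA data total i direction (fuel + 1) =
      if 0 ≤ i ∧ i < total then
        ((PySem.List.pyGet? data i).getD 0) ::
          goA data total (i + direction)
            (if 0 ≤ direction then -(direction + 1) else -(direction - 1)) fuel
      else [] := rfl

lemma goB_succ (data : List Int) (total c d : Int) (fuel : Nat) :
    goB data total c d (fuel + 1) =
      if c + d < total ∨ 0 ≤ c - d then
        ((if c + d < total then [(PySem.List.pyGet? data (c + d)).getD 0] else []) ++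
         (if 0 ≤ c - d then [(PySem.List.pyGet? data (c - d)).getD 0] else [])) ++
        goB data total c (d + 1) fuel
      else [] := rfl

-- From a "right" state (i = c+d, direction = -2d), A's remaining output equals B's loop at distance d.
lemma goA_eq_goB (data : List Int) (total c : Int)
    (h0 : 0 ≤ c) (h1 : 2 * c ≤ total - 1) (h2 : total - 1 ≤ 2 * c + 1) :
    ∀ (n fB : Nat) (d : Int), 1 ≤ d →
      total - c - d + 2 ≤ (n : Int) → total - c - d + 2 ≤ (fB : Int) →
      goA data total (c + d) (-(2 * d)) (2 * n) = goB data total c d fB := by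
  intro n
  induction n with
  | zero =>
    intro fB d hd hn hfB
    have hA : goA data total (c + d) (-(2 * d)) (2 * 0) = [] := rfl
    rw [hA]
    cases fB with
    | zero => rfl
    | succ f =>
      rw [goB_succ, if_neg (by push_cast at hn; omega : ¬ (c + d < total ∨ 0 ≤ c - d))]
  | succ m ih =>
    intro fB d hd hn hfB
    by_cases hr : c + d < total
    · -- A yields data[c+d]
      have hfuel : 2 * (m + 1) = (2 * m + 1) + 1 := by omega
      rw [hfuel, goA_succ, if_pos (by omega : (0:Int) ≤ c + d ∧ c + d < total),
          if_neg (by omega : ¬ (0:Int) ≤ -(2 * d))]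
      have hi2 : c + d + -(2 * d) = c - d := by ring
      have hd2 : -(-(2 * d) - 1) = 2 * d + 1 := by ring
      rw [hi2, hd2]
      obtain ⟨f, rfl⟩ : ∃ f, fB = f + 1 := ⟨fB - 1, by omega⟩
      rw [goB_succ, if_pos (Or.inl hr), if_pos hr]
      by_cases hl : 0 ≤ c - d
      · -- A also yields data[c-d], then recurses at distance d+1
        rw [goA_succ, if_pos (by omega : (0:Int) ≤ c - d ∧ c - d < total),
            if_pos (by omega : (0:Int) ≤ 2 * d + 1)]
        have hi3 : c - d + (2 * d + 1) = c + (d + 1) := by ring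
        have hd3 : -(2 * d + 1 + 1) = -(2 * (d + 1)) := by ring
        rw [hi3, hd3, if_pos hl]
        rw [ih f (d + 1) (by omega) (by push_cast at hn ⊢; omega) (by push_cast at hfB ⊢; omega)]
        rfl
      · -- left side exhausted: A stops after the right element; B's remaining loop is empty
        rw [goA_succ, if_neg (by omega : ¬ ((0:Int) ≤ c - d ∧ c - d < total)), if_neg hl]
        have hBrest : goB data total c (d + 1) f = [] := by
          cases f with
          | zero => rfl
          | succ f' =>
            rw [goB_succ, if_neg (by omega : ¬ (c + (d + 1) < total ∨ 0 ≤ c - (d + 1)))]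
        rw [hBrest]
        rfl
    · -- right side exhausted: both stop (left also exhausted since total ≥ 2c+1)
      have hfuel : 2 * (m + 1) = (2 * m + 1) + 1 := by omega
      rw [hfuel, goA_succ, if_neg (by omega : ¬ ((0:Int) ≤ c + d ∧ c + d < total))]
      cases fB with
      | zero => rfl
      | succ f =>
        rw [goB_succ, if_neg (by omega : ¬ (c + d < total ∨ 0 ≤ c - d))]

-- ===== VERDICT (by name: the statement is the Claim_ definition above) =====
theorem sparse_center_iterator_spec : Claim_equal_sparse_center_iterator := by
  intro data level _hdom
  unfold Spec_sparse_center_iterator sparse_center_iterator sparse_center_iterator_alt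
  simp only []
  set total : Int := (data.length : Int) with htotal
  have htnn : 0 ≤ total := by positivity
  by_cases h0 : total = 0
  · -- empty list: A's center index is -1, guard fails immediately
    have hlen : data.length = 0 := by omega
    have hc : PySem.Int.floordiv (total - 1) 2 = -1 := by
      rw [h0]; decide
    rw [if_pos h0, hc, hlen]
    rw [(by omega : 2 * 0 + 3 = 2 + 1), goA_succ,
        if_neg (by omega : ¬ ((0:Int) ≤ -1 ∧ -1 < total))]
  · rw [if_neg h0]
    have ht1 : 1 ≤ total := by omega
    set c := PySem.Int.floordiv (total - 1) 2 with hc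
    have hcdiv : c = (total - 1) / 2 := by
      rw [hc, PySem.Int.floordiv_eq_ediv_of_pos (by omega)]
    have h0c : 0 ≤ c := by omega
    have h1c : 2 * c ≤ total - 1 := by omega
    have h2c : total - 1 ≤ 2 * c + 1 := by omega
    -- first A step yields the center, moving to state (c+1, -2)
    rw [(by omega : 2 * data.length + 3 = (2 * (data.length + 1)) + 1), goA_succ,
        if_pos (by omega : (0:Int) ≤ c ∧ c < total),
        if_pos (by omega : (0:Int) ≤ 1)]
    rw [(by ring : -(1 + 1 : Int) = -(2 * 1))]
    rw [goA_eq_goB data total c h0c h1c h2c (data.length + 1) (data.length + 1) 1 le_rfl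
      (by push_cast; omega) (by push_cast; omega)]
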